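-- pv_equiv track=rewrite | github.com/MrTejpalSingh/Data_Structures | Small Practise Programs/Fundamentals Python/Module1/PatientSpeciality.py | max_visited_speciality
-- ===== SOURCE A (Python) =====
-- def max_visited_speciality(patient_medical_speciality_list, medical_speciality):
--     p = 0
--     o = 0
--     e = 0
--     speciality = ""
--     for i in range(0, len(patient_medical_speciality_list)):
--         if i % 2 != 0:
--             if patient_medical_speciality_list[i] == "P":
--                 p += 1
--             elif patient_medical_speciality_list[i] == "O":
--                 o += 1
--             elif patient_medical_speciality_list[i] == "E":
--                 e += 1
--     if p > o:
--         if p > e: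
--             speciality = medical_speciality["P"]
--         else:
--             speciality = medical_speciality["E"]
--     elif o > e:
--         speciality = medical_speciality["O"]
--     else:
--         speciality = medical_speciality["E"]
--
--     return speciality
-- ===== SOURCE B (Python) =====
-- def max_visited_speciality(patient_medical_speciality_list, medical_speciality):
--     odds = patient_medical_speciality_list[1::2]
--     return medical_speciality[max(('E', 'O', 'P'), key=odds.count)]
-- ===== Notes on version B (the rewrite author's own statement) =====
-- stated objective: idiomatic
-- what changed: B has no counting loop and no counters at all: it iterates over the three CANDIDATE keys ('E','O','P' -- first-max order reproducing A's tie rule) and scores each by scanning the odd-index slice with list.count, i.e. candidate-major staged passes instead of A's data-major single pass that maintains three accumulators and selects with a nested if/elif ladder.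
import Mathlib
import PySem

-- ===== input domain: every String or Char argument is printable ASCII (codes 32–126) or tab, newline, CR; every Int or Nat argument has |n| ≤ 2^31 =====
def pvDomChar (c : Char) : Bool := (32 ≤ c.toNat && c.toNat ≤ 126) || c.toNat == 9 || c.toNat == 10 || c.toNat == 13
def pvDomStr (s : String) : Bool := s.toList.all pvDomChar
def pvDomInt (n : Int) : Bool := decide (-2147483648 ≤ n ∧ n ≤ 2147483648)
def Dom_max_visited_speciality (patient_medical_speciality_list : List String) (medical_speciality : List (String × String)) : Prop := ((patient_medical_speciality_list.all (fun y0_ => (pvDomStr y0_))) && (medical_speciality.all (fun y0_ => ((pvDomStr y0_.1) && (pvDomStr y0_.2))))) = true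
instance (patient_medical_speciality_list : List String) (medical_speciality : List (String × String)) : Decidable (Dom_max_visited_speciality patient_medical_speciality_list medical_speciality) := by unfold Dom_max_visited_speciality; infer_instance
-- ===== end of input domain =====

-- B drops A's data-major counting loop: it iterates over the candidate keys ('E','O','P') and
-- scores each by a list.count scan of the odd-index slice — objective: idiomatic.

-- ===== PORT A =====
-- literal transliteration of A: index loop over range(0, len), three counters, nested if/elif selection
def max_visited_speciality (patient_medical_speciality_list : List String) (medical_speciality : List (String × String)) : String :=
  let st :=
    (PySem.List.pyRange 0 (patient_medical_speciality_list.length : Int) 1).foldl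
      (fun (st : Int × Int × Int) i =>
        if i % 2 ≠ 0 then
          if PySem.List.pyGetD patient_medical_speciality_list i "" = "P" then (st.1 + 1, st.2.1, st.2.2)
          else if PySem.List.pyGetD patient_medical_speciality_list i "" = "O" then (st.1, st.2.1 + 1, st.2.2)
          else if PySem.List.pyGetD patient_medical_speciality_list i "" = "E" then (st.1, st.2.1, st.2.2 + 1)
          else st
        else st)
      (0, 0, 0)
  if st.1 > st.2.1 then
    if st.1 > st.2.2 then PySem.Dict.getD (PySem.Dict.ofList medical_speciality) "P" ""
    else PySem.Dict.getD (PySem.Dict.ofList medical_speciality) "E" ""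
  else if st.2.1 > st.2.2 then PySem.Dict.getD (PySem.Dict.ofList medical_speciality) "O" ""
  else PySem.Dict.getD (PySem.Dict.ofList medical_speciality) "E" ""

-- ===== PORT B =====
-- literal transliteration of B: odds = lst[1::2]; return med[max(('E','O','P'), key=odds.count)]
def max_visited_speciality_alt (patient_medical_speciality_list : List String) (medical_speciality : List (String × String)) : String :=
  let odds := (PySem.List.slice? patient_medical_speciality_list (some 1) none 2).getD []
  match PySem.List.max? ["E", "O", "P"] (fun k => PySem.List.count odds k) with
  | some winner => PySem.Dict.getD (PySem.Dict.ofList medical_speciality) winner ""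
  | none => ""

-- ===== PRECONDITION & SPEC =====
-- the elements at odd indices (used only to state Pre_; neither port uses it)
def oddElems {α : Type} : List α → List α
  | [] => []
  | [_] => []
  | _ :: y :: t => y :: oddElems t

-- Pre_ excludes exactly the inputs where Python A raises KeyError: the winning speciality key
-- (determined by the odd-index counts, with A's tie rule) must be present in the dict.
def Pre_max_visited_speciality (patient_medical_speciality_list : List String) (medical_speciality : List (String × String)) : Prop :=
  let p := (oddElems patient_medical_speciality_list).count "P"
  let o := (oddElems patient_medical_speciality_list).count "O"
  let e := (oddElems patient_medical_speciality_list).count "E"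
  (PySem.Dict.get? (PySem.Dict.ofList medical_speciality)
    (if p > o then (if p > e then "P" else "E") else if o > e then "O" else "E")).isSome = true
instance (patient_medical_speciality_list : List String) (medical_speciality : List (String × String)) : Decidable (Pre_max_visited_speciality patient_medical_speciality_list medical_speciality) := by unfold Pre_max_visited_speciality; infer_instance

def pvWitness_max_visited_speciality : List String × (List (String × String)) :=
  (["X", "P", "A", "P"], [("P", "Physician")])

def Spec_max_visited_speciality (patient_medical_speciality_list : List String) (medical_speciality : List (String × String)) (out : String) : Prop := out = max_visited_speciality_alt patient_medical_speciality_list medical_speciality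
instance (patient_medical_speciality_list : List String) (medical_speciality : List (String × String)) (out : String) : Decidable (Spec_max_visited_speciality patient_medical_speciality_list medical_speciality out) := by unfold Spec_max_visited_speciality; infer_instance

-- ===== CLAIM (what is proved, stated in full; the proofs are below) =====
def Claim_equal_max_visited_speciality : Prop := ∀ (patient_medical_speciality_list : List String) (medical_speciality : List (String × String)), Dom_max_visited_speciality patient_medical_speciality_list medical_speciality → Pre_max_visited_speciality patient_medical_speciality_list medical_speciality → Spec_max_visited_speciality patient_medical_speciality_list medical_speciality (max_visited_speciality patient_medical_speciality_list medical_speciality)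

-- ===== LEMMAS AND PROOFS =====

theorem oddElems_append_singleton {α : Type} (xs : List α) (x : α) :
    oddElems (xs ++ [x]) = oddElems xs ++ (if xs.length % 2 = 1 then [x] else []) := by
  induction xs using oddElems.induct with
  | case1 => simp [oddElems]
  | case2 a => simp [oddElems]
  | case3 a b t ih =>
    simp only [List.cons_append, oddElems, ih, List.length_cons]
    have h2 : (t.length + 1 + 1) % 2 = 1 ↔ t.length % 2 = 1 := by omega
    simp [h2]

theorem oddElems_length {α : Type} (xs : List α) : (oddElems xs).length = xs.length / 2 := by
  induction xs using oddElems.induct with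
  | case1 => simp [oddElems]
  | case2 a => simp [oddElems]
  | case3 a b t ih => simp [oddElems, ih]; omega

theorem oddElems_getElem {α : Type} (xs : List α) (k : Nat) (h : k < (oddElems xs).length)
    (h2 : 2 * k + 1 < xs.length) : (oddElems xs)[k] = xs[2 * k + 1] := by
  induction xs using oddElems.induct generalizing k with
  | case1 => simp [oddElems] at h
  | case2 a => simp [oddElems] at h
  | case3 a b t ih =>
    match k with
    | 0 => simp [oddElems]
    | Nat.succ k =>
      have : 2 * (k + 1) + 1 = (2 * k + 1) + 1 + 1 := by ring
      simp only [oddElems, this, List.getElem_cons_succ]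
      exact ih k (by simpa [oddElems] using h) (by simp at h2; omega)

theorem filterMap_eq_map_of_some {α β : Type} (l : List α) (f : α → Option β) (g : α → β)
    (h : ∀ x ∈ l, f x = some (g x)) : l.filterMap f = l.map g := by
  induction l with
  | nil => rfl
  | cons a t ih =>
    simp [h a (by simp), ih (fun x hx => h x (by simp [hx]))]

-- B's slice lst[1::2] is exactly the odd-index elements
theorem slice_odd_eq_oddElems (xs : List String) :
    (PySem.List.slice? xs (some 1) none 2).getD [] = oddElems xs := by
  cases xs with
  | nil => rfl
  | cons a t =>
    set ys := a :: t with hys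
    have hlen : 1 ≤ ys.length := by simp [hys]
    have hidx : PySem.List.sliceIndices ys.length (some 1) none 2 = (1, (ys.length : Int), 2) := by
      simp [PySem.List.sliceIndices]
      omega
    have hcnt : (if 1 < ys.length then (((ys.length : Int) - 1 + 2 - 1) / 2).toNat else 0) = ys.length / 2 := by
      split <;> omega
    simp only [PySem.List.slice?, hidx]
    norm_num
    rw [hcnt]
    rw [filterMap_eq_map_of_some _ _ (fun k => ys.getD (2 * k + 1) "")]
    · apply List.ext_getElem
      · simp [oddElems_length]
      · intro i h1 h2
        have hb : 2 * i + 1 < ys.length := by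
          simp at h1; omega
        simp only [List.getElem_map, List.getElem_range]
        rw [oddElems_getElem ys i h2 hb, List.getD_eq_getElem?_getD,
          List.getElem?_eq_getElem hb]
        rfl
    · intro k hk
      simp only [List.mem_range] at hk
      have hb : 2 * k + 1 < ys.length := by omega
      have ht : (1 + 2 * (k : Int)).toNat = 2 * k + 1 := by omega
      rw [ht, List.getElem?_eq_getElem hb, List.getD_eq_getElem?_getD,
        List.getElem?_eq_getElem hb]
      rfl

-- the body of A's loop
def aBody (xs : List String) (st : Int × Int × Int) (i : Int) : Int × Int × Int :=
  if i % 2 ≠ 0 then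
    if PySem.List.pyGetD xs i "" = "P" then (st.1 + 1, st.2.1, st.2.2)
    else if PySem.List.pyGetD xs i "" = "O" then (st.1, st.2.1 + 1, st.2.2)
    else if PySem.List.pyGetD xs i "" = "E" then (st.1, st.2.1, st.2.2 + 1)
    else st
  else st

-- A's loop computes the odd-index counts
theorem aLoop_eq_counts (xs : List String) :
    (PySem.List.pyRange 0 (xs.length : Int) 1).foldl (aBody xs) (0, 0, 0) =
      (((oddElems xs).count "P" : Int), ((oddElems xs).count "O" : Int),
        ((oddElems xs).count "E" : Int)) := by
  induction xs using List.reverseRecOn with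
  | nil => simp [PySem.List.pyRange_one_eq_nil, oddElems]
  | append_singleton xs x ih =>
    have hlen : ((xs ++ [x]).length : Int) = (xs.length : Int) + 1 := by simp
    rw [hlen, PySem.List.pyRange_one_succ_right (by positivity), List.foldl_append]
    have hcongr : (PySem.List.pyRange 0 (xs.length : Int) 1).foldl (aBody (xs ++ [x])) (0, 0, 0) =
        (PySem.List.pyRange 0 (xs.length : Int) 1).foldl (aBody xs) (0, 0, 0) := by
      apply PySem.List.foldl_congr_mem
      intro acc i hi
      have hi' := (PySem.List.mem_pyRange_one).1 hi
      obtain ⟨k, hk, rfl⟩ : ∃ k : Nat, k < xs.length ∧ i = (k : Int) := by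
        refine ⟨i.toNat, by omega, by omega⟩
      have : PySem.List.pyGetD (xs ++ [x]) (k : Int) "" = PySem.List.pyGetD xs (k : Int) "" := by
        rw [PySem.List.pyGetD_natCast, PySem.List.pyGetD_natCast,
          List.getD_eq_getElem?_getD, List.getD_eq_getElem?_getD,
          List.getElem?_append_left hk]
      simp only [aBody, this]
    rw [hcongr, ih]
    have hget : PySem.List.pyGetD (xs ++ [x]) (xs.length : Int) "" = x := by
      rw [PySem.List.pyGetD_natCast, List.getD_eq_getElem?_getD, List.getElem?_concat_length]
      rfl
    simp only [List.foldl_cons, List.foldl_nil]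
    rw [oddElems_append_singleton]
    by_cases hpar : xs.length % 2 = 1
    · have hmod : ((xs.length : Int)) % 2 ≠ 0 := by omega
      rw [if_pos hpar]
      by_cases hP : x = "P"
      · subst hP
        simp [aBody, hmod, hget, List.count_append]
      · by_cases hO : x = "O"
        · subst hO
          simp [aBody, hmod, hget, hP, List.count_append]
        · by_cases hE : x = "E"
          · subst hE
            simp [aBody, hmod, hget, hP, hO, List.count_append]
          · simp [aBody, hmod, hget, hP, hO, hE, List.count_append]
    · have hmod : ¬ ((xs.length : Int)) % 2 ≠ 0 := by omega
      rw [if_neg hpar]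
      simp [aBody, hmod]

-- evaluating B's max over the three candidate keys
theorem max_three {β : Type} [LinearOrder β] (key : String → β) :
    PySem.List.max? ["E", "O", "P"] key =
      some (if key (if key "E" < key "O" then "O" else "E") < key "P" then "P"
            else if key "E" < key "O" then "O" else "E") := by
  by_cases h1 : key "E" < key "O"
  · simp only [PySem.List.max?, List.foldl, if_pos h1]
    split <;> rfl
  · simp only [PySem.List.max?, List.foldl, if_neg h1]
    split <;> rfl

-- ===== VERDICT (by name: the statement is the Claim_ definition above) =====
theorem max_visited_speciality_spec : Claim_equal_max_visited_speciality := by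
  intro lst med _ _
  unfold Spec_max_visited_speciality
  unfold max_visited_speciality max_visited_speciality_alt
  rw [show (fun (st : Int × Int × Int) i =>
        if i % 2 ≠ 0 then
          if PySem.List.pyGetD lst i "" = "P" then (st.1 + 1, st.2.1, st.2.2)
          else if PySem.List.pyGetD lst i "" = "O" then (st.1, st.2.1 + 1, st.2.2)
          else if PySem.List.pyGetD lst i "" = "E" then (st.1, st.2.1, st.2.2 + 1)
          else st
        else st) = aBody lst from rfl]
  rw [aLoop_eq_counts, slice_odd_eq_oddElems]
  simp only [PySem.List.count_eq]
  rw [max_three]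
  set p := (oddElems lst).count "P"
  set o := (oddElems lst).count "O"
  set e := (oddElems lst).count "E"
  by_cases h1 : (e : Int) < o <;> by_cases h2 : (o : Int) < p <;> by_cases h3 : (e : Int) < p <;>
    simp_all <;> split_ifs <;> first | rfl | omega
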